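-- pv_equiv track=rewrite | github.com/noobieofficial/noobieIdeV2.3.1 | noobie02.py | _reconstruct_from_original_line
-- ===== SOURCE A (Python) =====
-- from typing import Dict, List, Optional, Callable, Tuple
--
-- def _reconstruct_from_original_line(parts: List[str], start_index: int) -> str:
--     """Reconstruct string from original line, preserving only spaces inside quotes"""
--     # Join the parts back with spaces, then parse more carefully
--     original = ' '.join(parts[start_index:])
--     result = ""
--     i = 0
--
--     while i < len(original):
--         if original[i] in ['"', "'"]:
--             # Found start of quoted string
--             quote_char = original[i]
--             i += 1  # Skip opening quote
--             # Find matching closing quote and preserve all content inside including spaces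
--             quote_content = ""
--             while i < len(original) and original[i] != quote_char:
--                 quote_content += original[i]
--                 i += 1
--             if i < len(original):  # Skip closing quote
--                 i += 1
--             result += quote_content
--         elif original[i].isspace():
--             # Skip spaces between parts (don't preserve them)
--             i += 1
--         else:
--             # Found start of variable name
--             var_name = ""
--             while i < len(original) and not original[i].isspace() and original[i] not in ['"', "'"]:
--                 var_name += original[i]
--                 i += 1
--
--             # Handle special END variable (case insensitive)
--             if var_name.lower() == "end":
--                 result += "@end"
--             else:
--                 result += f"@{var_name}"
--
--     return result
-- ===== SOURCE B (Python) =====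
-- from typing import List
--
-- def _reconstruct_from_original_line(parts: List[str], start_index: int) -> str:
--     """Tokenize with str.partition/scan instead of an index loop; join the pieces."""
--     s = ' '.join(parts[start_index:])
--     pieces = []
--     while True:
--         s = s.lstrip()
--         if not s:
--             break
--         q = s[0]
--         if q in '"\'':
--             inner, _sep, s = s[1:].partition(q)
--             pieces.append(inner)
--         else:
--             j = next((k for k, ch in enumerate(s) if ch.isspace() or ch in '"\''), len(s))
--             name, s = s[:j], s[j:]
--             pieces.append('@end' if name.lower() == 'end' else '@' + name)
--     return ''.join(pieces)
-- ===== Notes on version B (the rewrite author's own statement) =====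
-- stated objective: idiomatic
-- what changed: Replaces A's index-driven while loop with char-by-char string accumulators by a partition-style tokenizer: lstrip, peel a quoted piece with str.partition (or a bare word up to the next delimiter), collect pieces in a list and ''.join them.
import Mathlib
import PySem

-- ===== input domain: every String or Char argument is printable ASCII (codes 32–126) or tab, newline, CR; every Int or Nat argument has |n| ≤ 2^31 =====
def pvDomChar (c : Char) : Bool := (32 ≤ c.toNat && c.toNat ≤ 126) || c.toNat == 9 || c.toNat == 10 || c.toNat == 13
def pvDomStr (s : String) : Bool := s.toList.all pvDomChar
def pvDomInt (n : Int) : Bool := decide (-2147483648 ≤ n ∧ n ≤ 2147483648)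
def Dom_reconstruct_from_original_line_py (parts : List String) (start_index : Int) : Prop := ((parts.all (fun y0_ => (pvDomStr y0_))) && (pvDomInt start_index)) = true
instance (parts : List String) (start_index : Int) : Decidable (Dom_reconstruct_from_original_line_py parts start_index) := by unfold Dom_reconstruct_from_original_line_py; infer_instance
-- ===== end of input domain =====

-- B re-tokenizes via takeWhile/dropWhile (partition-style) and joins a list of pieces,
-- instead of A's index-driven while loop with char-by-char accumulators; same result, no speed claim.

-- shared character class: a variable-name character (not whitespace, not a quote)
def pvTok (c : Char) : Bool := !(PySem.Chars.isspace c) && !(c == '"') && !(c == '\'')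

-- ===== PORT A =====
-- inner while: scan quoted content up to the matching quote, skipping the closing quote
def pvA_quote (q : Char) : List Char → List Char → List Char × List Char
  | [], content => (content, [])
  | c :: rest, content =>
    if c ≠ q then pvA_quote q rest (content ++ [c]) else (content, rest)

-- inner while: accumulate a variable name
def pvA_var : List Char → List Char → List Char × List Char
  | [], name => (name, [])
  | c :: rest, name =>
    if pvTok c then pvA_var rest (name ++ [c]) else (name, c :: rest)

theorem pvA_quote_eq (q : Char) : ∀ (l acc : List Char),
    pvA_quote q l acc = (acc ++ l.takeWhile (· ≠ q), (l.dropWhile (· ≠ q)).drop 1) := by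
  intro l
  induction l with
  | nil => intro acc; simp [pvA_quote]
  | cons c rest ih =>
    intro acc
    by_cases h : c = q
    · simp [pvA_quote, h]
    · simp [pvA_quote, h, ih]

theorem pvA_var_eq : ∀ (l acc : List Char),
    pvA_var l acc = (acc ++ l.takeWhile pvTok, l.dropWhile pvTok) := by
  intro l
  induction l with
  | nil => intro acc; simp [pvA_var]
  | cons c rest ih =>
    intro acc
    by_cases h : pvTok c = true
    · simp [pvA_var, h, ih]
    · simp [pvA_var, h]

-- outer while loop of A, carrying the result accumulator
def pvA_loop : List Char → List Char → List Char
  | [], res => res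
  | c :: rest, res =>
    if c = '"' ∨ c = '\'' then
      pvA_loop (pvA_quote c rest []).2 (res ++ (pvA_quote c rest []).1)
    else if PySem.Chars.isspace c then
      pvA_loop rest res
    else
      pvA_loop (pvA_var rest [c]).2
        (res ++ (if PySem.Chars.lower (pvA_var rest [c]).1 = ['e', 'n', 'd']
                 then ['@', 'e', 'n', 'd'] else '@' :: (pvA_var rest [c]).1))
  termination_by l _ => l.length
  decreasing_by
  · rw [pvA_quote_eq]
    have h1 := List.length_dropWhile_le (fun c_1 => decide ¬c_1 = c) rest
    simp at h1 ⊢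
    omega
  · simp
  · rw [pvA_var_eq]
    have h1 := List.length_dropWhile_le pvTok rest
    simp at h1 ⊢
    omega

def reconstruct_from_original_line_py (parts : List String) (start_index : Int) : String :=
  String.ofList
    (pvA_loop (PySem.Str.join " " (PySem.List.slice parts (some start_index) none)).toList [])

-- ===== PORT B =====
-- B's while loop: lstrip, then peel one quoted piece (partition) or one bare word per step
def pvB_loop (s : List Char) : List (List Char) :=
  match h : s.dropWhile PySem.Chars.isspace with
  | [] => []
  | q :: rest =>
    if q = '"' ∨ q = '\'' then
      rest.takeWhile (· ≠ q) :: pvB_loop ((rest.dropWhile (· ≠ q)).drop 1)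
    else
      (let name := (q :: rest).takeWhile pvTok
       if PySem.Chars.lower name = ['e', 'n', 'd'] then ['@', 'e', 'n', 'd'] else '@' :: name)
        :: pvB_loop ((q :: rest).dropWhile pvTok)
  termination_by s.length
  decreasing_by
  · have h0 := List.length_dropWhile_le PySem.Chars.isspace s
    rw [h] at h0
    have h1 := List.length_dropWhile_le (fun c => decide ¬c = q) rest
    simp at h0 h1 ⊢
    omega
  · have h0 := List.length_dropWhile_le PySem.Chars.isspace s
    rw [h] at h0
    rename_i hnq
    have hq : pvTok q = true := by
      have hne : s.dropWhile PySem.Chars.isspace ≠ [] := by simp [h]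
      have hsp := List.head_dropWhile_not PySem.Chars.isspace hne
      simp only [h, List.head_cons] at hsp
      have hq1 : (q == '"') = false := by simp; exact fun e => hnq (Or.inl e)
      have hq2 : (q == '\'') = false := by simp; exact fun e => hnq (Or.inr e)
      simp [pvTok, hsp, hq1, hq2]
    rw [List.dropWhile_cons_of_pos hq]
    have h1 := List.length_dropWhile_le pvTok rest
    simp at h0 h1 ⊢
    omega

def reconstruct_from_original_line_py_alt (parts : List String) (start_index : Int) : String :=
  String.ofList
    (PySem.Chars.join []
      (pvB_loop (PySem.Str.join " " (PySem.List.slice parts (some start_index) none)).toList))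

-- ===== PRECONDITION & SPEC =====
def Spec_reconstruct_from_original_line_py (parts : List String) (start_index : Int) (out : String) : Prop := out = reconstruct_from_original_line_py_alt parts start_index
instance (parts : List String) (start_index : Int) (out : String) : Decidable (Spec_reconstruct_from_original_line_py parts start_index out) := by unfold Spec_reconstruct_from_original_line_py; infer_instance

-- ===== CLAIM (what is proved, stated in full; the proofs are below) =====
def Claim_equal_reconstruct_from_original_line_py : Prop := ∀ (parts : List String) (start_index : Int), Dom_reconstruct_from_original_line_py parts start_index → Spec_reconstruct_from_original_line_py parts start_index (reconstruct_from_original_line_py parts start_index)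

-- ===== LEMMAS AND PROOFS =====

-- empty-separator join distributes over cons
theorem pvJoinNil_cons (a : List Char) (t : List (List Char)) :
    PySem.Chars.join [] (a :: t) = a ++ PySem.Chars.join [] t := by
  cases t with
  | nil => simp [PySem.Chars.join_singleton, PySem.Chars.join_nil]
  | cons b r => simp [PySem.Chars.join_cons_cons]

theorem pvB_space (c : Char) (rest : List Char) (h : PySem.Chars.isspace c = true) :
    pvB_loop (c :: rest) = pvB_loop rest := by
  have hd : List.dropWhile PySem.Chars.isspace (c :: rest)
      = List.dropWhile PySem.Chars.isspace rest := by simp [h]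
  rw [pvB_loop.eq_def, pvB_loop.eq_def]
  exact hd ▸ rfl

theorem pvB_quote (c : Char) (rest : List Char) (hq : c = '"' ∨ c = '\'') :
    pvB_loop (c :: rest) =
      rest.takeWhile (· ≠ c) :: pvB_loop ((rest.dropWhile (· ≠ c)).drop 1) := by
  have hsp : PySem.Chars.isspace c = false := by rcases hq with h | h <;> subst h <;> decide
  rw [pvB_loop.eq_def]
  rw [List.dropWhile_cons_of_neg (by simp [hsp])]
  simp only [if_pos hq]

theorem pvB_var (c : Char) (rest : List Char) (hsp : PySem.Chars.isspace c = false)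
    (hq : ¬(c = '"' ∨ c = '\'')) :
    pvB_loop (c :: rest) =
      (if PySem.Chars.lower ((c :: rest).takeWhile pvTok) = ['e', 'n', 'd']
       then ['@', 'e', 'n', 'd'] else '@' :: (c :: rest).takeWhile pvTok)
        :: pvB_loop ((c :: rest).dropWhile pvTok) := by
  rw [pvB_loop.eq_def]
  rw [List.dropWhile_cons_of_neg (by simp [hsp])]
  simp only [if_neg hq]

theorem pvA_eq_pvB : ∀ (n : Nat) (s res : List Char), s.length ≤ n →
    pvA_loop s res = res ++ PySem.Chars.join [] (pvB_loop s) := by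
  intro n
  induction n with
  | zero =>
    intro s res hs
    have : s = [] := List.eq_nil_of_length_eq_zero (Nat.le_zero.mp hs)
    subst this
    simp [pvA_loop, pvB_loop, PySem.Chars.join_nil]
  | succ n ih =>
    intro s res hs
    cases s with
    | nil => simp [pvA_loop, pvB_loop, PySem.Chars.join_nil]
    | cons c rest =>
      by_cases hq : c = '"' ∨ c = '\''
      · -- quote branch
        have hsp : PySem.Chars.isspace c = false := by
          rcases hq with h | h <;> subst h <;> decide
        rw [pvA_loop, if_pos hq, pvA_quote_eq, pvB_quote c rest hq, pvJoinNil_cons]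
        have hlen : ((rest.dropWhile (· ≠ c)).drop 1).length ≤ n := by
          have h1 := List.length_dropWhile_le (fun c_1 => decide ¬c_1 = c) rest
          simp at h1 hs ⊢
          omega
        rw [ih _ _ hlen]
        simp [List.append_assoc]
      · by_cases hsp : PySem.Chars.isspace c = true
        · -- space branch
          rw [pvA_loop, if_neg hq, if_pos hsp]
          rw [pvB_space c rest hsp]
          exact ih rest res (by simp at hs; omega)
        · -- variable branch
          simp only [Bool.not_eq_true] at hsp
          have htok : pvTok c = true := by
            have hq1 : (c == '"') = false := by simp; exact fun e => hq (Or.inl e)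
            have hq2 : (c == '\'') = false := by simp; exact fun e => hq (Or.inr e)
            simp [pvTok, hsp, hq1, hq2]
          rw [pvA_loop, if_neg hq, if_neg (by simp [hsp]), pvA_var_eq]
          rw [pvB_var c rest hsp hq, pvJoinNil_cons]
          have hname : (c :: rest).takeWhile pvTok = c :: rest.takeWhile pvTok := by
            simp [htok]
          have hdrop : (c :: rest).dropWhile pvTok = rest.dropWhile pvTok := by
            simp [htok]
          rw [hname, hdrop]
          have hlen : (rest.dropWhile pvTok).length ≤ n := by
            have h1 := List.length_dropWhile_le pvTok rest
            simp at hs; omega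
          rw [ih _ _ hlen]
          simp [List.append_assoc]

-- ===== VERDICT (by name: the statement is the Claim_ definition above) =====
theorem reconstruct_from_original_line_py_spec : Claim_equal_reconstruct_from_original_line_py := by
  intro parts start_index _
  unfold Spec_reconstruct_from_original_line_py reconstruct_from_original_line_py
    reconstruct_from_original_line_py_alt
  rw [pvA_eq_pvB (PySem.Str.join " " (PySem.List.slice parts (some start_index) none)).toList.length
    _ _ le_rfl]
  simp
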